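-- pv_equiv track=rewrite | github.com/tomytp/icpc-lib | latex/getlatex.py | remove_flags
-- ===== SOURCE A (Python) =====
-- def remove_flags(line: str) -> str:
--     has_l = False
--     has_r = False
--     for c in line:
--         if not has_l and c == '[':
--             has_l = True
--         elif has_l and c == ']':
--             has_r = True
--     if not (has_l and has_r):
--         return line
--     idx = line.find('[')
--     trimmed = line[:idx]
--     while trimmed.endswith(' '):
--         trimmed = trimmed[:-1]
--     return trimmed
-- ===== SOURCE B (Python) =====
-- def remove_flags(line: str) -> str:
--     # One streaming pass over a shared iterator: buffer pending spaces, flush them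
--     # before each non-space char; on the first '[' switch to hunting for ']' on the
--     # same iterator and return the built prefix as soon as one is found.
--     kept = []
--     pending_spaces = 0
--     it = iter(line)
--     for c in it:
--         if c == '[':
--             for d in it:
--                 if d == ']':
--                     return ''.join(kept)
--             return line
--         if c == ' ':
--             pending_spaces += 1
--         else:
--             kept.append(' ' * pending_spaces)
--             kept.append(c)
--             pending_spaces = 0
--     return line
-- ===== Notes on version B (the rewrite author's own statement) =====
-- stated objective: alternative
-- what changed: B is a single streaming pass over one shared iterator that builds the trimmed prefix incrementally (buffering runs of spaces and flushing them before the next non-space char) and returns it the moment a ']' is seen after the first '[', replacing A's separate flag-scan pass plus find/slice plus a trailing-space while-loop.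
import Mathlib
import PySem

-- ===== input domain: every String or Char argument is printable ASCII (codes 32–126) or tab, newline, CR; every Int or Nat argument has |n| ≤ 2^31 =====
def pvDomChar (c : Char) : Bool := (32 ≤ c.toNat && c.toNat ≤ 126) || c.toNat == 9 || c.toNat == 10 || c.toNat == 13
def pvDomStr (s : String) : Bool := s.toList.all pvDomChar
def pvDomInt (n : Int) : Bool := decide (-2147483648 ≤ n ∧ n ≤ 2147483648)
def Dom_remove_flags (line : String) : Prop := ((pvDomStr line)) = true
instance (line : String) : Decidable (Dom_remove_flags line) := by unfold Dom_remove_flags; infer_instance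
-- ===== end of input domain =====

-- B replaces A's flag-scan pass + find + slice + trailing-space while-loop by a single
-- streaming pass that buffers pending spaces, builds the trimmed prefix incrementally
-- and returns it as soon as a ']' is seen after the first '[' (alternative decomposition).

-- ===== PORT A =====
-- while trimmed.endswith(' '): trimmed = trimmed[:-1]
def pvTrimA (cs : List Char) : List Char :=
  if h : PySem.Chars.endswith cs [' '] then
    pvTrimA (PySem.Chars.slice cs none (some (-1)))
  else cs
termination_by cs.length
decreasing_by
  simp only [PySem.Chars.endswith_iff] at h
  rcases h with ⟨t, ht⟩
  simp [PySem.Chars.slice_eq_listSlice, PySem.List.slice_to_neg_one]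
  cases cs with
  | nil => simp at ht
  | cons a l => simp

-- loop body of A's for-loop, named for the proofs
def pvStepA (p : Bool × Bool) (c : Char) : Bool × Bool :=
  if !p.1 && c == '[' then (true, p.2)
  else if p.1 && c == ']' then (p.1, true)
  else p

def remove_flags (line : String) : String :=
  let st := line.toList.foldl pvStepA (false, false)
  if !(st.1 && st.2) then line
  else
    let idx := PySem.Str.find line "["
    let trimmed := PySem.Str.slice line none (some idx)
    String.ofList (pvTrimA trimmed.toList)

-- ===== PORT B =====
-- inner 'for d in it: if d == ']': return ''.join(kept)' then 'return line'
def pvFindClose (kept : List Char) (line : String) : List Char → String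
  | [] => line
  | d :: rest => if d = ']' then String.ofList kept else pvFindClose kept line rest

-- outer streaming loop: kept = flushed prefix, spaces = buffered pending spaces
def pvScanB (line : String) : List Char → List Char → Nat → String
  | [], _, _ => line
  | c :: rest, kept, spaces =>
    if c = '[' then pvFindClose kept line rest
    else if c = ' ' then pvScanB line rest kept (spaces + 1)
    else pvScanB line rest (kept ++ (List.replicate spaces ' ' ++ [c])) 0

def remove_flags_alt (line : String) : String := pvScanB line line.toList [] 0

-- ===== PRECONDITION & SPEC =====
def Spec_remove_flags (line : String) (out : String) : Prop := out = remove_flags_alt line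
instance (line : String) (out : String) : Decidable (Spec_remove_flags line out) := by unfold Spec_remove_flags; infer_instance

-- ===== CLAIM (what is proved, stated in full; the proofs are below) =====
def Claim_equal_remove_flags : Prop := ∀ (line : String), Dom_remove_flags line → Spec_remove_flags line (remove_flags line)

-- ===== LEMMAS AND PROOFS =====

-- proof-side vocabulary: first-'[' partition and drop-trailing-spaces
def pvPartitionBr : List Char → List Char × Bool × List Char
  | [] => ([], false, [])
  | c :: cs =>
    if c = '[' then ([], true, cs)
    else
      let r := pvPartitionBr cs
      (c :: r.1, r.2.1, r.2.2)

def pvRstripSpace (cs : List Char) : List Char :=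
  (cs.reverse.dropWhile (· == ' ')).reverse

theorem foldA_tt (cs : List Char) :
    cs.foldl pvStepA (true, true) = (true, true) := by
  induction cs with
  | nil => rfl
  | cons c cs ih =>
    rw [List.foldl_cons, show pvStepA (true, true) c = (true, true) by simp [pvStepA], ih]

theorem foldA_tf (cs : List Char) :
    cs.foldl pvStepA (true, false) = (true, cs.contains ']') := by
  induction cs with
  | nil => rfl
  | cons c cs ih =>
    rw [List.foldl_cons]
    by_cases h : c = ']'
    · subst h
      rw [show pvStepA (true, false) ']' = (true, true) by simp [pvStepA], foldA_tt]
      simp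
    · rw [show pvStepA (true, false) c = (true, false) by simp [pvStepA, h], ih]
      simp only [List.contains_cons]
      rw [beq_eq_false_iff_ne.mpr (fun e => h e.symm)]
      simp

theorem foldA_ff (cs : List Char) :
    cs.foldl pvStepA (false, false) =
    ((pvPartitionBr cs).2.1, (pvPartitionBr cs).2.1 && (pvPartitionBr cs).2.2.contains ']') := by
  induction cs with
  | nil => rfl
  | cons c cs ih =>
    rw [List.foldl_cons]
    by_cases h : c = '['
    · subst h
      rw [show pvStepA (false, false) '[' = (true, false) by simp [pvStepA], foldA_tf]
      simp [pvPartitionBr]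
    · rw [show pvStepA (false, false) c = (false, false) by simp [pvStepA, h], ih]
      simp [pvPartitionBr, h]

-- pvTrimA is exactly drop-trailing-spaces
theorem pvTrimA_eq (cs : List Char) : pvTrimA cs = pvRstripSpace cs := by
  induction hn : cs.length using Nat.strong_induction_on generalizing cs with
  | _ n ih =>
  rw [pvTrimA]
  by_cases h : PySem.Chars.endswith cs [' ']
  · simp only [h, if_pos]
    rw [PySem.Chars.endswith_iff] at h
    rcases h with ⟨t, ht⟩
    subst ht
    cases n with
    | zero => simp at hn
    | succ m =>
      have hd : PySem.Chars.slice (t ++ [' ']) none (some (-1)) = t := by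
        simp [PySem.Chars.slice_eq_listSlice, PySem.List.slice_to_neg_one]
      rw [hd, ih m (by omega) t (by simpa using hn)]
      simp [pvRstripSpace]
  · simp only [h, if_neg, not_false_iff]
    rw [PySem.Chars.endswith_iff] at h
    cases hc : cs.reverse with
    | nil =>
      have : cs = [] := by simpa using congrArg List.reverse hc
      simp [this, pvRstripSpace]
    | cons a l =>
      have hcs : cs = l.reverse ++ [a] := by
        have := congrArg List.reverse hc; simpa using this
      have ha : a ≠ ' ' := by
        intro e; exact h ⟨l.reverse, by rw [hcs, e]⟩
      simp [pvRstripSpace, hc, List.dropWhile_cons, ha, hcs]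

theorem partition_fst (cs : List Char) : (pvPartitionBr cs).1 = cs.takeWhile (· ≠ '[') := by
  induction cs with
  | nil => rfl
  | cons c cs ih =>
    by_cases h : c = '['
    · simp [pvPartitionBr, h, List.takeWhile_cons]
    · simp [pvPartitionBr, h, List.takeWhile_cons, ih]

theorem partition_flag_mem (cs : List Char) (h : (pvPartitionBr cs).2.1 = true) :
    '[' ∈ cs := by
  induction cs with
  | nil => simp [pvPartitionBr] at h
  | cons d ds ihd =>
    by_cases hd : d = '['
    · simp [hd]
    · simp only [pvPartitionBr, hd, if_neg, not_false_iff] at h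
      exact List.mem_cons_of_mem _ (ihd h)

theorem singleton_prefix_iff (a : Char) (l : List Char) : [a] <+: l ↔ l.head? = some a := by
  cases l with
  | nil => simp
  | cons b t => simp [List.cons_prefix_cons, eq_comm]

theorem takeWhile_char (cs : List Char) (a : Char) (h : a ∈ cs) :
    cs[(cs.takeWhile (· ≠ a)).length]? = some a ∧
      ∀ i < (cs.takeWhile (· ≠ a)).length, cs[i]? ≠ some a := by
  induction cs with
  | nil => simp at h
  | cons c cs ih =>
    by_cases hc : c = a
    · subst hc
      simp [List.takeWhile_cons]
    · have hm : a ∈ cs := by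
        rcases List.mem_cons.mp h with h' | h'
        · exact absurd h'.symm hc
        · exact h'
      rcases ih hm with ⟨h1, h2⟩
      have hTW : (c :: cs).takeWhile (· ≠ a) = c :: cs.takeWhile (· ≠ a) := by
        simp [hc]
      refine ⟨?_, ?_⟩
      · rw [hTW]
        simpa using h1
      · intro i hi
        rw [hTW] at hi
        simp only [List.length_cons] at hi
        cases i with
        | zero => simp [hc]
        | succ j => simpa using h2 j (by omega)

theorem find_singleton_eq (cs : List Char) (a : Char) (h : a ∈ cs) :
    PySem.Chars.find cs [a] = ((cs.takeWhile (· ≠ a)).length : Int) := by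
  have hinf : [a] <:+: cs := by
    rcases List.mem_iff_append.mp h with ⟨s, t, hst⟩
    exact ⟨s, t, by simp [hst]⟩
  have hnn : 0 ≤ PySem.Chars.find cs [a] := (PySem.Chars.find_nonneg_iff cs [a]).mpr hinf
  rcases PySem.Chars.find_spec hnn with ⟨hpre, hmin⟩
  set n := (PySem.Chars.find cs [a]).toNat with hn
  rcases takeWhile_char cs a h with ⟨ht1, ht2⟩
  set t := (cs.takeWhile (· ≠ a)).length with htdef
  have hpn : cs[n]? = some a := by
    rw [← List.head?_drop]
    exact (singleton_prefix_iff a (cs.drop n)).mp hpre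
  have hnt : ¬ n < t := fun hlt => ht2 n hlt hpn
  have htn : ¬ t < n := by
    intro hlt
    exact hmin t hlt ((singleton_prefix_iff a (cs.drop t)).mpr (by rw [List.head?_drop]; exact ht1))
  have : n = t := by omega
  rw [← this, hn, Int.toNat_of_nonneg hnn]

theorem take_len_takeWhile (cs : List Char) (p : Char → Bool) :
    cs.take (cs.takeWhile p).length = cs.takeWhile p := by
  induction cs with
  | nil => rfl
  | cons c cs ih =>
    by_cases h : p c
    · simp [h, ih]
    · simp [h]

-- B-side lemmas ----------------------------------------------------------

theorem findClose_eq (kept : List Char) (line : String) (cs : List Char) :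
    pvFindClose kept line cs = if cs.contains ']' then String.ofList kept else line := by
  induction cs with
  | nil => simp [pvFindClose]
  | cons d rest ih =>
    by_cases h : d = ']'
    · simp [pvFindClose, h]
    · have h' : ¬ (']' = d) := fun e => h e.symm
      simp [pvFindClose, h, ih, h']

theorem rstrip_replicate (n : Nat) : pvRstripSpace (List.replicate n ' ') = [] := by
  induction n with
  | zero => rfl
  | succ m ih =>
    simp only [pvRstripSpace, List.reverse_replicate] at *
    simpa [List.replicate_succ, List.dropWhile_cons] using ih

theorem rstrip_append_cons (x y : List Char) (c : Char) (hc : c ≠ ' ') :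
    pvRstripSpace (x ++ c :: y) = x ++ c :: pvRstripSpace y := by
  have hcb : (c == ' ') = false := by simpa using hc
  have key : List.dropWhile (· == ' ') (x ++ c :: y).reverse
      = List.dropWhile (· == ' ') y.reverse ++ c :: x.reverse := by
    rw [show (x ++ c :: y).reverse = y.reverse ++ c :: x.reverse by simp,
        List.dropWhile_append]
    by_cases h : List.dropWhile (· == ' ') y.reverse = []
    · simp [h, List.dropWhile_cons, hcb]
    · simp [h]
  unfold pvRstripSpace
  rw [key]
  simp

theorem scanB_eq (line : String) (cs : List Char) (kept : List Char) (spaces : Nat) :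
    pvScanB line cs kept spaces =
      if (pvPartitionBr cs).2.1 && (pvPartitionBr cs).2.2.contains ']' then
        String.ofList (kept ++ pvRstripSpace (List.replicate spaces ' ' ++ (pvPartitionBr cs).1))
      else line := by
  induction cs generalizing kept spaces with
  | nil => simp [pvScanB, pvPartitionBr]
  | cons c rest ih =>
    by_cases h : c = '['
    · subst h
      simp only [pvScanB, pvPartitionBr, if_pos rfl, findClose_eq]
      by_cases hr : ']' ∈ rest
      · simp [hr, rstrip_replicate]
      · simp [hr]
    · by_cases hs : c = ' '
      · subst hs
        have hne : ¬ ((' ' : Char) = '[') := by decide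
        rw [show pvScanB line (' ' :: rest) kept spaces = pvScanB line rest kept (spaces + 1) by
          simp [pvScanB]]
        rw [ih]
        simp only [pvPartitionBr, if_neg hne]
        have hrep : List.replicate (spaces + 1) ' ' ++ (pvPartitionBr rest).1
            = List.replicate spaces ' ' ++ (' ' :: (pvPartitionBr rest).1) := by
          simp [List.replicate_succ']
        rw [hrep]
      · rw [show pvScanB line (c :: rest) kept spaces
            = pvScanB line rest (kept ++ (List.replicate spaces ' ' ++ [c])) 0 by
          simp [pvScanB, h, hs]]
        rw [ih]
        simp only [pvPartitionBr, if_neg h]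
        have hrc := rstrip_append_cons (List.replicate spaces ' ') (pvPartitionBr rest).1 c hs
        simp [hrc]

theorem remove_flags_alt_eq (line : String) :
    remove_flags_alt line =
      if (pvPartitionBr line.toList).2.1 && (pvPartitionBr line.toList).2.2.contains ']' then
        String.ofList (pvRstripSpace (pvPartitionBr line.toList).1)
      else line := by
  rw [remove_flags_alt, scanB_eq]
  simp

-- ===== VERDICT (by name: the statement is the Claim_ definition above) =====
theorem remove_flags_spec : Claim_equal_remove_flags := by
  intro line _
  unfold Spec_remove_flags
  rw [remove_flags_alt_eq]
  by_cases h1 : (pvPartitionBr line.toList).2.1 = true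
  · by_cases h2 : (pvPartitionBr line.toList).2.2.contains ']' = true
    · have hmem : ']' ∈ (pvPartitionBr line.toList).2.2 := List.contains_iff_mem.mp h2
      have hA : remove_flags line =
          String.ofList (pvTrimA
            (PySem.Str.slice line none (some (PySem.Str.find line "["))).toList) := by
        simp [remove_flags, foldA_ff, h1, hmem]
      have hfind : PySem.Str.find line "[" = ((line.toList.takeWhile (· ≠ '[')).length : Int) := by
        have := find_singleton_eq line.toList '[' (partition_flag_mem _ h1)
        simpa using this
      have hslice : (PySem.Str.slice line none (some (PySem.Str.find line "["))).toList
          = line.toList.takeWhile (· ≠ '[') := by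
        rw [hfind]
        simp [PySem.Str.slice, PySem.Chars.slice_eq_listSlice, PySem.List.slice_to_natCast,
          take_len_takeWhile]
      rw [hA, if_pos (by simp [h1, hmem]), hslice, pvTrimA_eq, partition_fst]
    · have hnmem : ']' ∉ (pvPartitionBr line.toList).2.2 := fun hm =>
        h2 (List.contains_iff_mem.mpr hm)
      simp [remove_flags, foldA_ff, h1, hnmem]
  · have h1' : (pvPartitionBr line.toList).2.1 = false := by simpa using h1
    simp [remove_flags, foldA_ff, h1']
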